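-- pv_equiv track=rewrite | github.com/fingersdanny/TheTunnelToComputerScience_TheExitOfGoodbyes | 재귀(recursion)/괄호(Parantheses).py | balanced
-- ===== SOURCE A (Python) =====
-- def balanced(string):
--     # 왼쪽 괄호의 개수
--     count = 0
--     for i in range(len(string)):
--         # 왼쪽 괄호의 개수 세기
--         if string[i] == "(":
--             count += 1
--         # 왼쪽 괄호의 개수에서 오른쪽 괄호의 개수 빼기
--         else:
--             count -= 1
--
--         # 왼쪽과 오른쪽 괄호의 개수가 같다면 그 인덱스 반환
--         if count == 0:
--             return i
-- ===== SOURCE B (Python) =====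
-- def balanced(string):
--     # Parity argument: each char changes the balance by +/-1, so the balance is
--     # odd after any even index and can only be 0 at an odd index.  Scan the
--     # string two characters at a time (a lone trailing char can never be the
--     # answer and is ignored), checking for zero once per pair.
--     bal = 0
--     it = iter(string)
--     for k, (c1, c2) in enumerate(zip(it, it)):
--         bal += (1 if c1 == "(" else -1) + (1 if c2 == "(" else -1)
--         if bal == 0:
--             return 2 * k + 1
--     return None
-- ===== Notes on version B (the rewrite author's own statement) =====
-- stated objective: alternative
-- what changed: B exploits a parity invariant (the balance is odd after every even index, so a zero can only occur at an odd index): it consumes the string two characters per step via zip(it, it), dropping a lone trailing char, updates the balance once per pair and does one zero-test per pair instead of A's per-character test-and-return.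
import Mathlib
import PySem

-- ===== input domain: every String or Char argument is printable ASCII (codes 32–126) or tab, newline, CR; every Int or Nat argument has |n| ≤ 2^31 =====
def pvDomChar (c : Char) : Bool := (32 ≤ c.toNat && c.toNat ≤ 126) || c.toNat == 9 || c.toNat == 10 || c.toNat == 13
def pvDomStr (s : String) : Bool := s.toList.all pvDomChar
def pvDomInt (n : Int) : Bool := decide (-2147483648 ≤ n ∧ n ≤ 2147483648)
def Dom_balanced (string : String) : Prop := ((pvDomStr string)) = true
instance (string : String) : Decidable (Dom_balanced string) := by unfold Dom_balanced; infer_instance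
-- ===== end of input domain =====

-- B scans the string two characters per step (a parity argument shows only odd indices can answer); same output.

-- ===== PORT A =====
-- A's for-loop over indices with a running count and early return, as structural recursion.
def balancedGo : List Char → Int → Int → Option Int
  | [], _, _ => none
  | c :: cs, i, count =>
      let count' := if c = '(' then count + 1 else count - 1
      if count' = 0 then some i else balancedGo cs (i + 1) count'

def balanced (string : String) : Option Int :=
  balancedGo string.toList 0 0

-- ===== PORT B =====
-- B's loop over consecutive pairs zip(it, it) (a lone trailing char is dropped),
-- one balance update and one zero-test per pair, returning the odd index 2*k+1.
def balancedAltGo : List Char → Int → Int → Option Int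
  | c1 :: c2 :: cs, k, bal =>
      let bal' := bal + (if c1 = '(' then 1 else -1) + (if c2 = '(' then 1 else -1)
      if bal' = 0 then some (2 * k + 1) else balancedAltGo cs (k + 1) bal'
  | _, _, _ => none

def balanced_alt (string : String) : Option Int :=
  balancedAltGo string.toList 0 0

-- ===== PRECONDITION & SPEC =====
def Spec_balanced (string : String) (out : Option Int) : Prop := out = balanced_alt string
instance (string : String) (out : Option Int) : Decidable (Spec_balanced string out) := by unfold Spec_balanced; infer_instance

-- ===== CLAIM (what is proved, stated in full; the proofs are below) =====
def Claim_equal_balanced : Prop := ∀ (string : String), Dom_balanced string → Spec_balanced string (balanced string)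

-- ===== LEMMAS AND PROOFS =====
-- Invariant: with an even running balance, A's per-character scan from index 2*k
-- agrees with B's per-pair scan at pair index k (an odd balance is never 0).
theorem go_eq : ∀ (cs : List Char) (k bal : Int), bal % 2 = 0 →
    balancedGo cs (2 * k) bal = balancedAltGo cs k bal := by
  intro cs
  induction hn : cs.length using Nat.strong_induction_on generalizing cs with
  | _ n ih =>
    intro k bal hb
    match cs, hn with
    | [], _ => rfl
    | [c], _ =>
        simp only [balancedGo, balancedAltGo]
        rw [if_neg (show (if c = '(' then bal + 1 else bal - 1) ≠ 0 by
          by_cases h : c = '(' <;> simp [h] <;> omega)]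
    | c1 :: c2 :: rest, hn =>
        have h1 : (if c1 = '(' then bal + 1 else bal - 1) ≠ 0 := by
          by_cases h : c1 = '(' <;> simp [h] <;> omega
        simp only [balancedGo, balancedAltGo]
        rw [if_neg h1]
        have heq : (if c2 = '(' then (if c1 = '(' then bal + 1 else bal - 1) + 1
                else (if c1 = '(' then bal + 1 else bal - 1) - 1)
              = (bal + (if c1 = '(' then 1 else -1)) + (if c2 = '(' then 1 else -1) := by
          by_cases h : c1 = '(' <;> by_cases h' : c2 = '(' <;> simp [h, h'] <;> omega
        rw [heq]
        by_cases hz : (bal + (if c1 = '(' then 1 else -1)) + (if c2 = '(' then 1 else -1) = 0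
        · rw [if_pos hz, if_pos hz]
        · rw [if_neg hz, if_neg hz]
          have hb' : ((bal + (if c1 = '(' then 1 else -1)) + (if c2 = '(' then 1 else -1)) % 2 = 0 := by
            by_cases h : c1 = '(' <;> by_cases h' : c2 = '(' <;> simp [h, h'] <;> omega
          have h2k : 2 * k + 1 + 1 = 2 * (k + 1) := by ring
          rw [h2k]
          exact ih rest.length (by simp [← hn]) rest rfl (k + 1) _ hb'

-- ===== VERDICT (by name: the statement is the Claim_ definition above) =====
theorem balanced_spec : Claim_equal_balanced := by
  intro s _
  unfold Spec_balanced balanced balanced_alt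
  have := go_eq s.toList 0 0 rfl
  simpa using this
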